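-- pv_equiv track=rewrite | github.com/sykokorev/pipe_diffuser | mathlib/vector.py | wedge
-- ===== SOURCE A (Python) =====
-- def outer(v1: list, v2: list) -> list:
--
--     out = []
--     for v in v1:
--         out.append([v * (-1) * u for u in v2])
--
--     return out
--
-- def wedge(v1: list, v2: list):
--
--     u1 = outer(v1, v2)
--     u2 = outer(v2, v1)
--     for i, ui in enumerate(u2):
--         u2[i] = [(-1) * uj for uj in ui]
--
--     out = []
--     for u1i, u2i in zip(u1 , u2):
--         out.append([u1j + u2j for u1j, u2j in zip(u1i, u2i)])
--
--     return out
-- ===== SOURCE B (Python) =====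
-- def wedge(v1: list, v2: list):
--     m = min(len(v1), len(v2))
--     return [[v2[i] * v1[j] - v1[i] * v2[j] for j in range(m)] for i in range(m)]
-- ===== Notes on version B (the rewrite author's own statement) =====
-- stated objective: simpler
-- what changed: Replaces the two intermediate outer-product matrices, the in-place row negation and the double zip with one nested comprehension computing each entry v2[i]*v1[j] - v1[i]*v2[j] directly over min(len(v1),len(v2)).
import Mathlib
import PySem

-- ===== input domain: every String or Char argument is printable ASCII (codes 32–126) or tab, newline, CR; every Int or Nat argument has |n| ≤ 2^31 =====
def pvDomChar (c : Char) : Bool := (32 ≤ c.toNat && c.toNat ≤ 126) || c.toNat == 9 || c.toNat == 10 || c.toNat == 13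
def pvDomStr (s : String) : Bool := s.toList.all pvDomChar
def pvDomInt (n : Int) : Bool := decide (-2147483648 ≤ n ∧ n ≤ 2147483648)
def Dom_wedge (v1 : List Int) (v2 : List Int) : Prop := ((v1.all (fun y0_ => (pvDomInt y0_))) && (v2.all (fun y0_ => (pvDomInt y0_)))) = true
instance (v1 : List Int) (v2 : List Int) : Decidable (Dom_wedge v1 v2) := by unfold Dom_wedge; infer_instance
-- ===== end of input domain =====

-- B replaces A's two intermediate outer-product matrices, in-place negation and double zip
-- by one nested comprehension computing each entry directly (objective: simpler).

-- ===== PORT A =====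
-- helper 'outer': out = []; for v in v1: out.append([v * (-1) * u for u in v2])
def outerA (v1 : List Int) (v2 : List Int) : List (List Int) :=
  v1.foldl (fun out v => out ++ [v2.map (fun u => v * (-1) * u)]) []

def wedge (v1 : List Int) (v2 : List Int) : List (List Int) :=
  let u1 := outerA v1 v2
  let u2 := outerA v2 v1
  -- for i, ui in enumerate(u2): u2[i] = [(-1) * uj for uj in ui]
  let u2 := u2.map (fun ui => ui.map (fun uj => (-1) * uj))
  -- out = []; for u1i, u2i in zip(u1, u2): out.append([u1j + u2j for ...])
  (u1.zip u2).foldl (fun out p => out ++ [(p.1.zip p.2).map (fun q => q.1 + q.2)]) []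

-- ===== PORT B =====
def wedge_alt (v1 : List Int) (v2 : List Int) : List (List Int) :=
  let m := min v1.length v2.length
  (List.range m).map (fun i =>
    (List.range m).map (fun j => v2.getD i 0 * v1.getD j 0 - v1.getD i 0 * v2.getD j 0))

-- ===== PRECONDITION & SPEC =====
def Spec_wedge (v1 : List Int) (v2 : List Int) (out : List (List Int)) : Prop := out = wedge_alt v1 v2
instance (v1 : List Int) (v2 : List Int) (out : List (List Int)) : Decidable (Spec_wedge v1 v2 out) := by unfold Spec_wedge; infer_instance

-- ===== CLAIM (what is proved, stated in full; the proofs are below) =====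
def Claim_equal_wedge : Prop := ∀ (v1 : List Int) (v2 : List Int), Dom_wedge v1 v2 → Spec_wedge v1 v2 (wedge v1 v2)

-- ===== LEMMAS AND PROOFS =====

-- append-accumulator loop = map
theorem foldl_append_map {α β : Type} (f : α → β) (l : List α) (acc : List β) :
    l.foldl (fun out v => out ++ [f v]) acc = acc ++ l.map f := by
  induction l generalizing acc with
  | nil => simp
  | cons x xs ih => simp [List.foldl, ih, List.append_assoc]

theorem outerA_eq (v1 v2 : List Int) :
    outerA v1 v2 = v1.map (fun v => v2.map (fun u => v * (-1) * u)) := by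
  unfold outerA
  rw [foldl_append_map]
  simp

-- ===== VERDICT (by name: the statement is the Claim_ definition above) =====
theorem wedge_spec : Claim_equal_wedge := by
  intro v1 v2 _
  unfold Spec_wedge wedge wedge_alt
  rw [outerA_eq, outerA_eq,
      foldl_append_map (fun p : List Int × List Int => (p.1.zip p.2).map (fun q => q.1 + q.2))]
  simp only [List.nil_append, List.map_map]
  apply List.ext_getElem
  · simp
  · intro i h1 h2
    simp only [List.getElem_map, List.getElem_zip, List.getElem_range]
    apply List.ext_getElem
    · simp
      omega
    · intro j g1 g2
      have hm : i < min v1.length v2.length := by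
        simpa [min_comm] using h2
      have hj : j < min v1.length v2.length := by
        simpa [min_comm] using g2
      simp only [Function.comp_apply, List.getElem_map, List.getElem_zip, List.getElem_range]
      rw [List.getD_eq_getElem v2 0 (by omega), List.getD_eq_getElem v1 0 (by omega),
          List.getD_eq_getElem v1 0 (by omega), List.getD_eq_getElem v2 0 (by omega)]
      ring
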